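-- pv_equiv track=rewrite | github.com/Omnistudent/Transposeek_dev | event/views.py | find_starts_ends
-- ===== SOURCE A (Python) =====
-- def find_starts_ends(querylist):
--     lookingfor="start"
--     results=[]
--     fcounter=1
--     currentstart=-1
--     for i in querylist:
--         if lookingfor=="start":
--             if i==1:
--                 currentstart=fcounter
--                 lookingfor="end"
--                 fcounter+=1
--                 continue
--         if lookingfor=="end":
--             if i==0:
--                 results.append([currentstart,fcounter-1])
--                 lookingfor="start"
--         fcounter+=1
--     if lookingfor=="end":
--         results.append([currentstart,len(querylist)])
--     return results
-- ===== SOURCE B (Python) =====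
-- def find_starts_ends(querylist):
--     results = []
--     n = len(querylist)
--     i = 0
--     while i < n:
--         if querylist[i] != 1:
--             i += 1
--             continue
--         start = i + 1
--         j = i + 1
--         while j < n and querylist[j] != 0:
--             j += 1
--         results.append([start, j])
--         i = j + 1
--     return results
-- ===== Notes on version B (the rewrite author's own statement) =====
-- stated objective: alternative
-- what changed: Replaced the single-pass string-labelled state machine (lookingfor/fcounter/currentstart over a for loop) by explicit index scanning: an outer while loop searching for a 1 and an inner while loop consuming the run up to the terminating 0 or end of list.
import Mathlib
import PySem

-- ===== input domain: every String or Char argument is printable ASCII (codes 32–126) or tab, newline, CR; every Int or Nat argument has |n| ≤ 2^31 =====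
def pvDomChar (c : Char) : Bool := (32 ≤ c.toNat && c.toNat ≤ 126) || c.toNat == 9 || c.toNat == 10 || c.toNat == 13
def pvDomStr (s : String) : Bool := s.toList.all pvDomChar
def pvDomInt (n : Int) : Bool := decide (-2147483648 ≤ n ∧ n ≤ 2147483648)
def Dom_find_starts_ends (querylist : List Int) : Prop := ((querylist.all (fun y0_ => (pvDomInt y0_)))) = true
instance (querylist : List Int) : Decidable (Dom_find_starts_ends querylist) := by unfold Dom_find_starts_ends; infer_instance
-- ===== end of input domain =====

-- B replaces A's flat string-labelled state machine by an outer search / inner consume pair of index loops; alternative decomposition, same cost.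

-- ===== PORT A =====
-- one iteration of A's for-loop body over the state (lookingfor, results, fcounter, currentstart)
def pvStepA (s : String × List (List Int) × Int × Int) (i : Int) :
    String × List (List Int) × Int × Int :=
  match s with
  | (lookingfor, results, fcounter, currentstart) =>
    if lookingfor == "start" then
      if i == 1 then ("end", results, fcounter + 1, fcounter)   -- currentstart=fcounter; fcounter+=1; continue
      else ("start", results, fcounter + 1, currentstart)
    else
      if i == 0 then ("start", results ++ [[currentstart, fcounter - 1]], fcounter + 1, currentstart)
      else ("end", results, fcounter + 1, currentstart)

def find_starts_ends (querylist : List Int) : List (List Int) :=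
  match querylist.foldl pvStepA ("start", [], 1, -1) with
  | (lookingfor, results, _, currentstart) =>
    if lookingfor == "end" then results ++ [[currentstart, (querylist.length : Int)]]
    else results

-- ===== PORT B =====
-- inner while loop: advance j while j < n and querylist[j] != 0
def pvInner (q : List Int) (j : Nat) : Nat :=
  if j < q.length then
    if q[j]! ≠ 0 then pvInner q (j + 1) else j
  else j
termination_by q.length - j

theorem pvInner_ge (q : List Int) (j : Nat) : j ≤ pvInner q j := by
  induction j using pvInner.induct (q := q) with
  | case1 j h1 h2 ih => rw [pvInner]; simp only [if_pos h1, if_pos h2]; omega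
  | case2 j h1 h2 =>
    have h0 : q[j] = 0 := by simpa [getElem!_pos q j h1] using h2
    rw [pvInner]; simp [h1, h0, getElem!_pos q j h1]
  | case3 j h1 => rw [pvInner]; simp [h1]

-- outer while loop: scan i for a 1, consume the run with pvInner, record [i+1, j], resume at j+1
def pvOuter (q : List Int) (i : Nat) (acc : List (List Int)) : List (List Int) :=
  if h : i < q.length then
    if q[i]! ≠ 1 then pvOuter q (i + 1) acc
    else
      let j := pvInner q (i + 1)
      pvOuter q (j + 1) (acc ++ [[((i : Int) + 1), (j : Int)]])
  else acc
termination_by q.length - i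
decreasing_by
  · omega
  · have := pvInner_ge q (i + 1); omega

def find_starts_ends_alt (querylist : List Int) : List (List Int) :=
  pvOuter querylist 0 []

-- ===== PRECONDITION & SPEC =====
def Spec_find_starts_ends (querylist : List Int) (out : List (List Int)) : Prop := out = find_starts_ends_alt querylist
instance (querylist : List Int) (out : List (List Int)) : Decidable (Spec_find_starts_ends querylist out) := by unfold Spec_find_starts_ends; infer_instance

-- ===== CLAIM (what is proved, stated in full; the proofs are below) =====
def Claim_equal_find_starts_ends : Prop := ∀ (querylist : List Int), Dom_find_starts_ends querylist → Spec_find_starts_ends querylist (find_starts_ends querylist)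

-- ===== LEMMAS AND PROOFS =====

-- reference characterisation: pvGo true pos cs xs = runs of xs where the head of xs sits at 1-based position pos
def pvGo (isStart : Bool) (pos cs : Int) : List Int → List (List Int)
  | [] => if isStart then [] else [[cs, pos - 1]]
  | x :: xs =>
    if isStart then
      if x = 1 then pvGo false (pos + 1) pos xs else pvGo true (pos + 1) cs xs
    else
      if x = 0 then [cs, pos - 1] :: pvGo true (pos + 1) cs xs else pvGo false (pos + 1) cs xs

-- A's fcounter counts processed elements
theorem pvA_fc (xs : List Int) : ∀ s, (List.foldl pvStepA s xs).2.2.1 = s.2.2.1 + xs.length := by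
  induction xs with
  | nil => intro s; simp
  | cons x xs ih =>
    intro ⟨l, r, k, c⟩
    simp only [List.foldl_cons, ih, pvStepA]
    split_ifs <;> simp <;> omega

def pvFinA (s : String × List (List Int) × Int × Int) : List (List Int) :=
  if s.1 == "end" then s.2.1 ++ [[s.2.2.2, s.2.2.1 - 1]] else s.2.1

theorem pvA_fold (xs : List Int) : ∀ (b : Bool) (res : List (List Int)) (k cs : Int),
    pvFinA (List.foldl pvStepA ((if b then "start" else "end"), res, k, cs) xs)
      = res ++ pvGo b k cs xs := by
  induction xs with
  | nil =>
    intro b res k cs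
    cases b <;> simp [pvFinA, pvGo]
  | cons x xs ih =>
    intro b res k cs
    cases b with
    | true =>
      by_cases hx : x = 1
      · simpa [pvStepA, pvGo, hx] using ih false res (k + 1) k
      · simpa [pvStepA, pvGo, hx] using ih true res (k + 1) cs
    | false =>
      by_cases hx : x = 0
      · have h := ih true (res ++ [[cs, k - 1]]) (k + 1) cs
        simpa [pvStepA, pvGo, hx] using h
      · simpa [pvStepA, pvGo, hx] using ih false res (k + 1) cs

theorem pvA_eq_go (q : List Int) : find_starts_ends q = pvGo true 1 (-1) q := by
  have hfc := pvA_fc q ("start", ([] : List (List Int)), 1, -1)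
  have h := pvA_fold q true [] 1 (-1)
  norm_num at h
  unfold find_starts_ends
  rcases hs : List.foldl pvStepA ("start", ([] : List (List Int)), 1, -1) q with ⟨l, r, k, c⟩
  rw [hs] at hfc h
  simp at hfc
  unfold pvFinA at h
  simp at h
  have hk : k - 1 = (q.length : Int) := by omega
  rw [hk] at h
  simpa using h

-- B's inner loop against pvGo in "end" mode
theorem pvInner_go (q : List Int) (j : Nat) (cs : Int) (hj : j ≤ q.length) :
    pvGo false ((j : Int) + 1) cs (q.drop j)
      = if pvInner q j < q.length then
          [cs, (pvInner q j : Int)] :: pvGo true ((pvInner q j : Int) + 2) cs (q.drop (pvInner q j + 1))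
        else [[cs, (pvInner q j : Int)]] := by
  induction j using pvInner.induct (q := q) with
  | case1 j h1 h2 ih =>
    rw [pvInner]
    simp only [if_pos h1, if_pos h2]
    have hd : q.drop j = q[j] :: q.drop (j + 1) := List.drop_eq_getElem_cons h1
    have hget : q[j]! = q[j] := getElem!_pos q j h1
    rw [hget] at h2
    rw [hd, pvGo]
    simp only [Bool.false_eq_true, if_false, if_neg h2]
    have := ih (by omega)
    convert this using 3 <;> push_cast <;> ring
  | case2 j h1 h2 =>
    rw [pvInner]
    simp only [if_pos h1, if_neg h2]
    have hd : q.drop j = q[j] :: q.drop (j + 1) := List.drop_eq_getElem_cons h1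
    have hget : q[j]! = q[j] := getElem!_pos q j h1
    rw [hget] at h2
    push_neg at h2
    rw [hd, pvGo]
    simp only [Bool.false_eq_true, if_false, if_pos h2, if_pos h1]
    have e1 : (j : Int) + 1 - 1 = (j : Int) := by ring
    have e2 : (j : Int) + 1 + 1 = (j : Int) + 2 := by ring
    rw [e1, e2]
  | case3 j h1 =>
    rw [pvInner]
    have hj' : j = q.length := by omega
    simp [h1, List.drop_eq_nil_of_le (le_of_eq hj'.symm), pvGo, hj']

theorem pvOuter_go (q : List Int) (i : Nat) (acc : List (List Int)) :
    ∀ cs : Int, pvOuter q i acc = acc ++ pvGo true ((i : Int) + 1) cs (q.drop i) := by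
  induction i, acc using pvOuter.induct (q := q) with
  | case1 i acc h hne ih =>
    intro cs
    rw [pvOuter]
    simp only [dif_pos h, if_pos hne]
    have hget : q[i]! = q[i] := getElem!_pos q i h
    rw [hget] at hne
    rw [List.drop_eq_getElem_cons h, pvGo, ih cs]
    simp only [if_true, if_neg hne]
    have e : ((i + 1 : Nat) : Int) + 1 = (i : Int) + 1 + 1 := by push_cast; ring
    rw [e]
  | case2 i acc h hne j ih =>
    intro cs
    rw [pvOuter]
    simp only [dif_pos h, if_neg hne]
    have hget : q[i]! = q[i] := getElem!_pos q i h
    rw [hget] at hne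
    push_neg at hne
    rw [List.drop_eq_getElem_cons h, pvGo]
    simp only [if_true, if_pos hne]
    have hinner := pvInner_go q (i + 1) ((i : Int) + 1) (by omega)
    have hc1 : ((i + 1 : Nat) : Int) + 1 = (i : Int) + 1 + 1 := by push_cast; ring
    rw [hc1] at hinner
    rw [hinner]
    by_cases hlt : pvInner q (i + 1) < q.length
    · rw [if_pos hlt, ih ((i : Int) + 1)]
      have e2 : ((pvInner q (i + 1) + 1 : Nat) : Int) + 1 = ((pvInner q (i + 1) : Nat) : Int) + 2 := by
        push_cast; ring
      rw [e2]
      simp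
      exact ⟨rfl, rfl⟩
    · rw [if_neg hlt, ih cs]
      rw [List.drop_eq_nil_of_le (by omega : q.length ≤ pvInner q (i + 1) + 1), pvGo]
      simp
      rfl
  | case3 i acc h =>
    intro cs
    rw [pvOuter]
    simp [h, List.drop_eq_nil_of_le (by omega : q.length ≤ i), pvGo]

-- ===== VERDICT (by name: the statement is the Claim_ definition above) =====
theorem find_starts_ends_spec : Claim_equal_find_starts_ends := by
  intro q _
  unfold Spec_find_starts_ends find_starts_ends_alt
  rw [pvA_eq_go, pvOuter_go q 0 [] (-1)]
  simp
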